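-- pv_equiv track=rewrite | github.com/danieljhkim/DataStructures-Algorithms | python/leetcode/contests/2025_04/contest445.py | smallestPalindrome
-- ===== SOURCE A (Python) =====
-- from itertools import accumulate, permutations, combinations
-- from collections import Counter, deque, defaultdict, OrderedDict
--
-- def smallestPalindrome(s: str, k: int) -> str:  # MLE
--     N = len(s)
--     if N == 1 and k == 1:
--         return s
--     counts, cands = Counter(s), []
--     mid, half, total = None, N // 2, 1
--
--     for kk, v in counts.items():
--         if v > 1:
--             h = v // 2
--             total *= half * h
--             diff = v % 2
--             if diff == 1:
--                 mid = kk
--             cands.extend([kk] * (v // 2))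
--         elif v == 1:
--             mid = kk
--
--     if total + 1 < k:
--         return ""
--     cands.sort()
--     perms = list(permutations(cands))
--     nset = set()
--     ans = None
--     for p in perms:
--         nset.add(p)
--         if len(nset) == k:
--             ans = "".join(p)
--             break
--     if not ans:
--         return ""
--     res = ans
--     rev = res[::-1]
--     if mid:
--         res += mid
--     res += rev
--     return res
-- ===== SOURCE B (Python) =====
-- from collections import Counter
--
--
-- def _uniq_sorted(chars):
--     # distinct values of a list, first occurrences in order
--     if not chars:
--         return []
--     rest = [c for c in chars[1:] if c != chars[0]]
--     return [chars[0]] + _uniq_sorted(rest)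
--
--
-- def _distinct_perms(chars):
--     # all DISTINCT permutations of the sorted list `chars`, in lexicographic
--     # order, generated without ever producing a duplicate
--     if not chars:
--         return [[]]
--     res = []
--     for c in _uniq_sorted(chars):
--         rest = list(chars)
--         rest.remove(c)
--         for p in _distinct_perms(rest):
--             res.append([c] + p)
--     return res
--
--
-- def smallestPalindrome(s: str, k: int) -> str:
--     N = len(s)
--     if N == 1 and k == 1:
--         return s
--     counts = Counter(s)
--     half = N // 2
--     mid, total = None, 1
--     for c, v in counts.items():
--         if v > 1:
--             total *= half * (v // 2)
--             if v % 2 == 1: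
--                 mid = c
--         elif v == 1:
--             mid = c
--     if total + 1 < k:
--         return ""
--     cands = []
--     for c in sorted(counts):
--         cands += [c] * (counts[c] // 2)
--     dp = _distinct_perms(cands)
--     if k < 1 or k > len(dp):
--         return ""
--     half_str = "".join(dp[k - 1])
--     if not half_str:
--         return ""
--     return half_str + (mid if mid else "") + half_str[::-1]
-- ===== Notes on version B (the rewrite author's own statement) =====
-- stated objective: faster
-- what changed: A materialises all n! permutations of the half-multiset with itertools.permutations and deduplicates them through a set while scanning for the k-th new one; B generates only the distinct permutations directly, in lexicographic order, by recursing over the distinct characters of the sorted half-multiset, and indexes the k-th.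
import Mathlib
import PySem

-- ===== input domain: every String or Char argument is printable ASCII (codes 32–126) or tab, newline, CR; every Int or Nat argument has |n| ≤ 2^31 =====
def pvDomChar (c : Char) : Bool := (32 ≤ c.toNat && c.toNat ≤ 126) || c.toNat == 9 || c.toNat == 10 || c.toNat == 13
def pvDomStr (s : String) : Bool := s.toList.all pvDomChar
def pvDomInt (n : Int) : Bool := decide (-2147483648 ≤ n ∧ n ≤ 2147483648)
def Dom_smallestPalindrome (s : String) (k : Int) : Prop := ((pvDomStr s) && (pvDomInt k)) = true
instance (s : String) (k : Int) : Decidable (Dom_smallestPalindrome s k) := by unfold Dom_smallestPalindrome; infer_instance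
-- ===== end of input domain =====

-- B replaces A's "materialise all n! permutations and dedup them with a set" by a direct
-- recursive generation of the distinct permutations in lexicographic order (no duplicate
-- is ever produced), then indexes the k-th one.


-- ===== PORT A =====

-- body of A's 'for kk, v in counts.items()' loop; state = (mid, total, cands)
def pvStepA (half : Int) (st : Option Char × Int × List Char) (kv : Char × Int) :
    Option Char × Int × List Char :=
  if 1 < kv.2 then
    let h := PySem.Int.floordiv kv.2 2
    let total := st.2.1 * (half * h)
    let diff := PySem.Int.mod kv.2 2
    let mid := if diff = 1 then some kv.1 else st.1
    (mid, total, st.2.2 ++ PySem.List.pyRepeat [kv.1] (PySem.Int.floordiv kv.2 2))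
  else if kv.2 = 1 then (some kv.1, st.2.1, st.2.2)
  else st

-- 'for p in perms: nset.add(p); if len(nset) == k: ans = "".join(p); break'
def pvFindAns : List (List Char) → PySem.Set (List Char) → Int → Option (List Char)
  | [], _, _ => none
  | p :: ps, st, k =>
    let st' := PySem.Set.add st p
    if PySem.Set.len st' = k then some p else pvFindAns ps st' k

def smallestPalindrome (s : String) (k : Int) : String :=
  let cs := s.toList
  if (cs.length : Int) = 1 ∧ k = 1 then s else
  let counts := PySem.Dict.counter cs
  let half := PySem.Int.floordiv (cs.length : Int) 2
  let st := counts.items.foldl (pvStepA half) (none, 1, [])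
  if st.2.1 + 1 < k then "" else
  let cands := PySem.List.sorted st.2.2 (fun x => x)            -- cands.sort()
  let perms := PySem.List.permutations cands cands.length        -- list(permutations(cands))
  match pvFindAns perms PySem.Set.empty k with
  | none => ""                                                   -- 'if not ans' (ans is None)
  | some p =>
    if p = [] then ""                                            -- 'if not ans' (ans == "")
    -- res[::-1] is the reversed string (exact); 'if mid: res += mid; res += rev'
    else String.ofList (p ++ (match st.1 with | some m => [m] | none => []) ++ p.reverse)

-- ===== PORT B =====

-- port of _uniq_sorted (first occurrences, in order); fuel = length makes the
-- recursion structural, the '0, _ :: _' branch is never reached with enough fuel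
def pvDedupFGo {α : Type} [DecidableEq α] : Nat → List α → List α
  | _, [] => []
  | 0, _ :: _ => []
  | n+1, x :: rest => x :: pvDedupFGo n (rest.filter (fun y => decide (y ≠ x)))

def pvDedupF {α : Type} [DecidableEq α] (l : List α) : List α := pvDedupFGo l.length l

-- port of _distinct_perms (same fuel device); 'rest = list(chars); rest.remove(c)'
-- removes the first occurrence of the present element c, i.e. chars.erase c
-- (PySem.List.remove?_eq_some_erase)
def pvDpermsGo : Nat → List Char → List (List Char)
  | _, [] => [[]]
  | 0, _ :: _ => []
  | n+1, c0 :: rest =>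
      (pvDedupF (c0 :: rest)).foldl
        (fun res c => res ++ (pvDpermsGo n ((c0 :: rest).erase c)).map (fun p => c :: p)) []

def pvDperms (chars : List Char) : List (List Char) := pvDpermsGo chars.length chars

-- body of B's 'for c, v in counts.items()' loop; state = (mid, total)
def pvStepB (half : Int) (st : Option Char × Int) (kv : Char × Int) : Option Char × Int :=
  if 1 < kv.2 then
    let total := st.2 * (half * PySem.Int.floordiv kv.2 2)
    (if PySem.Int.mod kv.2 2 = 1 then some kv.1 else st.1, total)
  else if kv.2 = 1 then (some kv.1, st.2)
  else st

def smallestPalindrome_alt (s : String) (k : Int) : String :=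
  let cs := s.toList
  if (cs.length : Int) = 1 ∧ k = 1 then s else
  let counts := PySem.Dict.counter cs
  let half := PySem.Int.floordiv (cs.length : Int) 2
  let st := counts.items.foldl (pvStepB half) (none, 1)
  if st.2 + 1 < k then "" else
  let cands := (PySem.List.sorted counts.keys (fun x => x)).foldl
      (fun acc c => acc ++ PySem.List.pyRepeat [c] (PySem.Int.floordiv (counts.getD c 0) 2)) []
  let dp := pvDperms cands
  if k < 1 ∨ (dp.length : Int) < k then "" else
  let halfL := (PySem.List.pyGet? dp (k - 1)).getD []            -- dp[k-1]; in range by the check above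
  if halfL = [] then "" else
  String.ofList (halfL ++ (match st.1 with | some m => [m] | none => []) ++ halfL.reverse)

-- ===== PRECONDITION & SPEC =====
def Spec_smallestPalindrome (s : String) (k : Int) (out : String) : Prop := out = smallestPalindrome_alt s k
instance (s : String) (k : Int) (out : String) : Decidable (Spec_smallestPalindrome s k out) := by unfold Spec_smallestPalindrome; infer_instance

-- ===== CLAIM (what is proved, stated in full; the proofs are below) =====
def Claim_equal_smallestPalindrome : Prop := ∀ (s : String) (k : Int), Dom_smallestPalindrome s k → Spec_smallestPalindrome s k (smallestPalindrome s k)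

-- ===== LEMMAS AND PROOFS =====

-- ---- fuel irrelevance and unfolding equations for B's helpers ----

theorem pvDedupFGo_fuel {α : Type} [DecidableEq α] :
    ∀ (n m : Nat) (l : List α), l.length ≤ n → l.length ≤ m → pvDedupFGo n l = pvDedupFGo m l := by
  intro n
  induction n with
  | zero =>
    intro m l h1 h2
    cases l with
    | nil => cases m <;> rfl
    | cons x r => simp at h1
  | succ n ih =>
    intro m l h1 h2
    cases l with
    | nil => cases m <;> rfl
    | cons x r =>
      cases m with
      | zero => simp at h2
      | succ m =>
        simp only [pvDedupFGo]
        have hf := List.length_filter_le (fun y => decide (y ≠ x)) r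
        simp only [List.length_cons] at h1 h2
        rw [ih m _ (le_trans hf (by omega)) (le_trans hf (by omega))]

theorem pvDedupF_nil {α : Type} [DecidableEq α] : pvDedupF ([] : List α) = [] := rfl

theorem pvDedupF_cons {α : Type} [DecidableEq α] (x : α) (rest : List α) :
    pvDedupF (x :: rest) = x :: pvDedupF (rest.filter (fun y => decide (y ≠ x))) := by
  unfold pvDedupF
  simp only [List.length_cons, pvDedupFGo]
  rw [pvDedupFGo_fuel rest.length _ _ (List.length_filter_le _ _) le_rfl]

theorem pvDedupF_subset {α : Type} [DecidableEq α] (l : List α) (x : α)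
    (hx : x ∈ pvDedupF l) : x ∈ l := by
  induction hn : l.length using Nat.strong_induction_on generalizing l with
  | _ n ih =>
    cases l with
    | nil => simp [pvDedupF, pvDedupFGo] at hx
    | cons c rest =>
      rw [pvDedupF_cons] at hx
      rcases List.mem_cons.1 hx with h | h
      · simp [h]
      · subst hn
        exact List.mem_cons_of_mem _ (List.mem_of_mem_filter
          (ih (rest.filter (fun y => decide (y ≠ c))).length
            (by simpa using Nat.lt_succ_of_le (List.length_filter_le _ _)) _ h rfl))

theorem pvDpermsGo_fuel :
    ∀ (n m : Nat) (l : List Char), l.length ≤ n → l.length ≤ m → pvDpermsGo n l = pvDpermsGo m l := by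
  intro n
  induction n with
  | zero =>
    intro m l h1 h2
    cases l with
    | nil => cases m <;> rfl
    | cons x r => simp at h1
  | succ n ih =>
    intro m l h1 h2
    cases l with
    | nil => cases m <;> rfl
    | cons c0 rest =>
      cases m with
      | zero => simp at h2
      | succ m =>
        simp only [pvDpermsGo]
        apply PySem.List.foldl_congr_mem'
        intro c hc acc
        have hm := pvDedupF_subset _ _ hc
        have hlen := List.length_erase_of_mem hm
        simp only [List.length_cons] at h1 h2
        simp only [List.length_cons] at hlen
        rw [ih m ((c0 :: rest).erase c) (by omega) (by omega)]

theorem pvDperms_cons (c0 : Char) (rest : List Char) :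
    pvDperms (c0 :: rest) = (pvDedupF (c0 :: rest)).foldl
      (fun res c => res ++ (pvDperms ((c0 :: rest).erase c)).map (fun p => c :: p)) [] := by
  unfold pvDperms
  simp only [List.length_cons, pvDpermsGo]
  apply PySem.List.foldl_congr_mem'
  intro c hc acc
  have hm := pvDedupF_subset _ _ hc
  have hlen := List.length_erase_of_mem hm
  simp only [List.length_cons] at hlen
  rw [pvDpermsGo_fuel rest.length ((c0 :: rest).erase c).length ((c0 :: rest).erase c) (by omega) le_rfl]

-- ---- generic facts about first-occurrence dedup ----

theorem pvDedupF_append {α : Type} [DecidableEq α] :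
    ∀ (l₁ l₂ : List α), pvDedupF (l₁ ++ l₂) =
      pvDedupF l₁ ++ pvDedupF (l₂.filter (fun y => decide (y ∉ l₁))) := by
  intro l₁
  induction hn : l₁.length using Nat.strong_induction_on generalizing l₁ with
  | _ n ih =>
    intro l₂
    cases l₁ with
    | nil => simp [pvDedupF_nil]
    | cons x t =>
      subst hn
      simp only [List.cons_append, pvDedupF_cons, List.filter_append]
      rw [ih (t.filter (fun y => decide (y ≠ x))).length
        (by simpa using Nat.lt_succ_of_le (List.length_filter_le _ _)) _ rfl]
      simp only [List.cons.injEq, true_and]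
      congr 2
      rw [List.filter_filter]
      apply List.filter_congr
      intro y hy
      by_cases hyx : y = x <;> by_cases hyt : y ∈ t <;> simp [hyx, hyt]

theorem pvDedupF_map_cons (c : Char) (L : List (List Char)) :
    pvDedupF (L.map (fun p => c :: p)) = (pvDedupF L).map (fun p => c :: p) := by
  induction hn : L.length using Nat.strong_induction_on generalizing L with
  | _ n ih =>
    cases L with
    | nil => simp [pvDedupF_nil]
    | cons q t =>
      subst hn
      simp only [List.map_cons, pvDedupF_cons, List.cons.injEq, true_and]
      rw [List.filter_map]
      have hpred : ∀ y ∈ t, ((fun y => decide (y ≠ c :: q)) ∘ (fun p => c :: p)) y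
          = (fun y => decide (y ≠ q)) y := by intro y hy; simp
      rw [List.filter_congr hpred]
      exact ih (t.filter (fun y => decide (y ≠ q))).length
        (by simpa using Nat.lt_succ_of_le (List.length_filter_le _ _)) _ rfl

theorem pvFilter_flatMap {α β : Type} [DecidableEq α] [DecidableEq β] (f : α → List β)
    (hdisj : ∀ a a', a ≠ a' → ∀ x, x ∈ f a → x ∉ f a') (a : α) :
    ∀ (t : List α), (t.flatMap f).filter (fun y => decide (y ∉ f a))
      = (t.filter (fun y => decide (y ≠ a))).flatMap f := by
  intro t
  induction t with
  | nil => rfl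
  | cons b r ihr =>
    rw [List.flatMap_cons, List.filter_append, ihr, List.filter_cons]
    by_cases hba : b = a
    · subst hba
      have h1 : (f b).filter (fun y => decide (y ∉ f b)) = [] :=
        List.filter_eq_nil_iff.2 (fun x hx => by simp [hx])
      rw [h1]
      simp
    · have h1 : (f b).filter (fun y => decide (y ∉ f a)) = f b :=
        List.filter_eq_self.2 (fun x hx => by simpa using hdisj b a hba x hx)
      rw [h1]
      simp [hba]

theorem pvDedupF_flatMap {α β : Type} [DecidableEq α] [DecidableEq β] (f : α → List β)
    (hdisj : ∀ a a', a ≠ a' → ∀ x, x ∈ f a → x ∉ f a') :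
    ∀ l : List α, pvDedupF (l.flatMap f) = (pvDedupF l).flatMap (fun a => pvDedupF (f a)) := by
  intro l
  induction hn : l.length using Nat.strong_induction_on generalizing l with
  | _ n ih =>
    cases l with
    | nil => simp [pvDedupF_nil]
    | cons a t =>
      subst hn
      rw [List.flatMap_cons, pvDedupF_append]
      rw [pvFilter_flatMap f hdisj a t,
        ih (t.filter (fun y => decide (y ≠ a))).length
          (by simpa using Nat.lt_succ_of_le (List.length_filter_le _ _)) _ rfl,
        pvDedupF_cons, List.flatMap_cons]

-- ---- the permutations of a sorted list, grouped by first letter ----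

theorem pvConsEraseIdx (x : Char) :
    ∀ (t : List Char) (i : Nat) (hi : i < t.length), (x :: t).Pairwise (· ≤ ·) → t[i]'hi = x →
      x :: t.eraseIdx i = t := by
  intro t
  induction t with
  | nil => intro i hi; simp at hi
  | cons y r ihr =>
    intro i hi hp hx
    cases i with
    | zero => simp at hx; simp [hx, List.eraseIdx]
    | succ i =>
      have hi' : i < r.length := by simpa using hi
      simp only [List.getElem_cons_succ] at hx
      have hxy : x = y := by
        have h1 : x ≤ y := (List.pairwise_cons.1 hp).1 y (by simp)
        have h2 : y ≤ r[i]'hi' :=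
          (List.pairwise_cons.1 (List.pairwise_cons.1 hp).2).1 _ (List.getElem_mem hi')
        rw [hx] at h2
        exact le_antisymm h1 h2
      subst hxy
      rw [List.eraseIdx_cons_succ]
      rw [ihr i hi' hp.of_cons hx]

theorem pvSorted_eraseIdx_eq_erase :
    ∀ (xs : List Char), xs.Pairwise (· ≤ ·) → ∀ (i : Nat) (h : i < xs.length),
      xs.eraseIdx i = xs.erase (xs[i]'h) := by
  intro xs
  induction xs with
  | nil => intro _ i hi; simp at hi
  | cons x t iht =>
    intro hp i hi
    cases i with
    | zero => simp [List.eraseIdx]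
    | succ i =>
      have hi' : i < t.length := by simpa using hi
      simp only [List.getElem_cons_succ, List.eraseIdx_cons_succ]
      by_cases hxv : x = t[i]'hi'
      · have he : (x :: t).erase (t[i]'hi') = t := by rw [← hxv, List.erase_cons_head]
        rw [he]
        exact pvConsEraseIdx x t i hi' hp hxv.symm
      · have he : (x :: t).erase (t[i]'hi') = x :: t.erase (t[i]'hi') :=
          List.erase_cons_tail (by simp [hxv])
        rw [he, iht hp.of_cons i hi']

theorem pvFlatMap_range_get {α β : Type} :
    ∀ (xs : List α) (F : Nat → List β) (f : α → List β),
      (∀ (i : Nat) (hi : i < xs.length), F i = f (xs[i]'hi)) →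
      (List.range xs.length).flatMap F = xs.flatMap f := by
  intro xs
  induction xs with
  | nil => intro F f h; simp
  | cons x t iht =>
    intro F f h
    rw [List.length_cons, List.range_succ_eq_map, List.flatMap_cons, List.flatMap_map]
    rw [h 0 (by simp), iht (fun i => F (i + 1)) f (fun i hi => h (i + 1) (by simpa using hi)),
      List.flatMap_cons]
    simp

theorem pvPermutations_succ {α : Type} (xs : List α) (r : Nat) :
    PySem.List.permutations xs (r+1) = (List.range xs.length).flatMap
      (fun i => match xs[i]? with
        | none => []
        | some x => (PySem.List.permutations (xs.eraseIdx i) r).map (fun p => x :: p)) := by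
  rw [PySem.List.permutations]
  rfl

theorem pvPerms_sorted_eq (xs : List Char) (hs : xs.Pairwise (· ≤ ·)) (hne : xs ≠ []) :
    PySem.List.permutations xs xs.length = xs.flatMap
      (fun c => (PySem.List.permutations (xs.erase c) (xs.length - 1)).map (fun p => c :: p)) := by
  obtain ⟨x, t, rfl⟩ := List.exists_cons_of_ne_nil hne
  have hlen : (x :: t).length = t.length + 1 := rfl
  rw [hlen, pvPermutations_succ]
  have hr : t.length + 1 - 1 = t.length := rfl
  rw [hr]
  apply pvFlatMap_range_get (x :: t)
  intro i hi
  simp only [List.getElem?_eq_getElem hi]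
  rw [pvSorted_eraseIdx_eq_erase (x :: t) hs i hi]

-- ---- MAIN: first-occurrence dedup of A's permutation stream = B's distinct generation ----

theorem pvDedupF_perms (xs : List Char) (hs : xs.Pairwise (· ≤ ·)) :
    pvDedupF (PySem.List.permutations xs xs.length) = pvDperms xs := by
  induction hn : xs.length using Nat.strong_induction_on generalizing xs with
  | _ n ih =>
    cases xs with
    | nil => subst hn; rfl
    | cons c0 rest =>
      subst hn
      rw [pvPerms_sorted_eq _ hs (by simp)]
      rw [pvDedupF_flatMap
        (fun c => (PySem.List.permutations ((c0 :: rest).erase c) ((c0 :: rest).length - 1)).map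
          (fun p => c :: p))
        (by
          intro a a' hne x hx hx'
          rcases List.mem_map.1 hx with ⟨p, _, hp⟩
          rcases List.mem_map.1 hx' with ⟨p', _, hp'⟩
          exact hne (by rw [← hp] at hp'; exact (List.cons.injEq _ _ _ _ ▸ hp'.symm).1))]
      rw [pvDperms_cons, PySem.List.foldl_append_eq_flatMap, List.nil_append]
      apply List.flatMap_congr
      intro c hc
      have hcm : c ∈ c0 :: rest := pvDedupF_subset _ _ hc
      have hlenE := List.length_erase_of_mem hcm
      have hsE : ((c0 :: rest).erase c).Pairwise (· ≤ ·) := hs.sublist (List.erase_sublist)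
      have hlen1 : (c0 :: rest).length - 1 = ((c0 :: rest).erase c).length := by
        rw [hlenE]
      rw [pvDedupF_map_cons, hlen1,
        ih ((c0 :: rest).erase c).length (by rw [← hlen1]; simp) _ hsE rfl]

-- ---- the two preprocessing loops agree on (mid, total) and on the sorted half-multiset ----

theorem pvStepAB (half : Int) :
    ∀ (l : List (Char × Int)) (m : Option Char) (t : Int) (cd : List Char),
      (l.foldl (pvStepA half) (m, t, cd)).1 = (l.foldl (pvStepB half) (m, t)).1 ∧
      (l.foldl (pvStepA half) (m, t, cd)).2.1 = (l.foldl (pvStepB half) (m, t)).2 := by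
  intro l
  induction l with
  | nil => simp
  | cons kv rest ih =>
    intro m t cd
    simp only [List.foldl_cons, pvStepA, pvStepB]
    split_ifs <;> exact ih _ _ _

theorem pvStepA_cands (half : Int) :
    ∀ (l : List (Char × Int)) (m : Option Char) (t : Int) (cd : List Char),
      (l.foldl (pvStepA half) (m, t, cd)).2.2 = cd ++ l.flatMap
        (fun kv => if 1 < kv.2 then PySem.List.pyRepeat [kv.1] (PySem.Int.floordiv kv.2 2) else []) := by
  intro l
  induction l with
  | nil => simp
  | cons kv rest ih =>
    intro m t cd
    simp only [List.foldl_cons, List.flatMap_cons, pvStepA]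
    split_ifs with h1 h2 <;> rw [ih] <;> simp [List.append_assoc]

theorem pvPairwise_flatMap_replicate (m : Char → Nat) :
    ∀ (S : List Char), S.Pairwise (· < ·) →
      (S.flatMap (fun c => List.replicate (m c) c)).Pairwise (· ≤ ·) := by
  intro S
  induction S with
  | nil => simp
  | cons c t ih =>
    intro hp
    rw [List.flatMap_cons]
    rw [List.pairwise_append]
    refine ⟨List.pairwise_replicate.2 (by simp), ih hp.of_cons, ?_⟩
    intro a ha b hb
    rcases List.mem_flatMap.1 hb with ⟨d, hd, hbd⟩
    rw [List.eq_of_mem_replicate ha, List.eq_of_mem_replicate hbd]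
    exact le_of_lt ((List.pairwise_cons.1 hp).1 d hd)

theorem pvSorted_flatMap_replicate (K : List Char) (hk : K.Nodup) (m : Char → Nat) :
    PySem.List.sorted (K.flatMap (fun c => List.replicate (m c) c)) (fun x => x)
      = (PySem.List.sorted K (fun x => x)).flatMap (fun c => List.replicate (m c) c) := by
  apply PySem.List.eq_of_perm_of_pairwise_le_of_injective (fun x => x) (fun a b h => h)
  · exact (PySem.List.sorted_perm _ _ _).trans
      (List.Perm.flatMap_right _ (PySem.List.sorted_perm K (fun x => x) false).symm)
  · exact PySem.List.sorted_pairwise _ _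
  · apply pvPairwise_flatMap_replicate
    have hp := PySem.List.sorted_pairwise K (fun x => x)
    have hnd : (PySem.List.sorted K (fun x => x)).Nodup :=
      (PySem.List.sorted_perm K (fun x => x) false).nodup_iff.2 hk
    exact (hp.and hnd).imp (fun h => lt_of_le_of_ne h.1 h.2)

theorem pvCands_eq (cs : List Char) (half : Int) :
    PySem.List.sorted ((PySem.Dict.counter cs).items.foldl (pvStepA half) (none, 1, [])).2.2 (fun x => x)
      = (PySem.List.sorted (PySem.Dict.counter cs).keys (fun x => x)).foldl
          (fun acc c => acc ++ PySem.List.pyRepeat [c]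
            (PySem.Int.floordiv ((PySem.Dict.counter cs).getD c 0) 2)) [] := by
  rw [PySem.List.foldl_append_eq_flatMap, List.nil_append, PySem.Dict.keys_counter,
    pvStepA_cands, List.nil_append, PySem.Dict.items_counter, List.flatMap_map]
  have hfun : ∀ c ∈ PySem.Set.ofList cs,
      (fun a => if 1 < (a, (cs.count a : Int)).2 then
          PySem.List.pyRepeat [(a, (cs.count a : Int)).1]
            (PySem.Int.floordiv (a, (cs.count a : Int)).2 2) else []) c
      = List.replicate (PySem.Int.floordiv ((cs.count c : Int)) 2).toNat c := by
    intro c _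
    simp only
    by_cases h1 : 1 < (cs.count c : Int)
    · rw [if_pos h1, PySem.List.pyRepeat_singleton]
    · rw [if_neg h1]
      have h2 : PySem.Int.floordiv ((cs.count c : Int)) 2 = 0 := by
        rw [PySem.Int.floordiv_eq_ediv_of_pos (by norm_num)]
        omega
      rw [h2]
      rfl
  rw [List.flatMap_congr hfun]
  have hfun2 : ∀ c ∈ PySem.List.sorted (PySem.Set.ofList cs) (fun x => x),
      (fun c => PySem.List.pyRepeat [c] (PySem.Int.floordiv ((PySem.Dict.counter cs).getD c 0) 2)) c
      = List.replicate (PySem.Int.floordiv ((cs.count c : Int)) 2).toNat c := by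
    intro c _
    simp only
    rw [PySem.Dict.getD_counter, PySem.List.pyRepeat_singleton]
  rw [List.flatMap_congr hfun2]
  exact pvSorted_flatMap_replicate (PySem.Set.ofList cs) (PySem.Set.nodup_ofList cs)
    (fun c => (PySem.Int.floordiv ((cs.count c : Int)) 2).toNat)

-- ---- A's set-scan finds the k-th first-occurrence ----

theorem pvFindAns_nonpos :
    ∀ (l : List (List Char)) (st : PySem.Set (List Char)) (k : Int), k ≤ 0 →
      pvFindAns l st k = none := by
  intro l
  induction l with
  | nil => intro st k hk; rfl
  | cons p ps ih =>
    intro st k hk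
    simp only [pvFindAns]
    have hlen : 1 ≤ (PySem.Set.add st p).length := by
      by_cases h : p ∈ st
      · have := List.length_pos_of_mem h
        simp [PySem.Set.add, h]
        omega
      · simp [PySem.Set.add, h]
    rw [if_neg (by simp only [PySem.Set.len]; omega)]
    exact ih _ _ hk

theorem pvFindAns_eq :
    ∀ (l : List (List Char)) (st : PySem.Set (List Char)) (k : Int), (st.length : Int) < k →
      pvFindAns l st k =
        (pvDedupF (l.filter (fun p => decide (p ∉ st))))[(k - st.length - 1).toNat]? := by
  intro l
  induction l with
  | nil => intro st k hk; simp [pvFindAns, pvDedupF_nil]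
  | cons p ps ih =>
    intro st k hk
    simp only [pvFindAns]
    by_cases hmem : p ∈ st
    · have hadd : PySem.Set.add st p = st := by simp [PySem.Set.add, hmem]
      rw [hadd, if_neg (by simp only [PySem.Set.len]; omega)]
      have hfc : (p :: ps).filter (fun q => decide (q ∉ st)) =
          ps.filter (fun q => decide (q ∉ st)) := by simp [hmem]
      rw [hfc, ih st k hk]
    · have hadd : PySem.Set.add st p = st ++ [p] := by simp [PySem.Set.add, hmem]
      rw [hadd]
      have hfc : (p :: ps).filter (fun q => decide (q ∉ st)) =
          p :: ps.filter (fun q => decide (q ∉ st)) := by simp [hmem]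
      rw [hfc, pvDedupF_cons]
      have hff : (ps.filter (fun q => decide (q ∉ st))).filter (fun q => decide (q ≠ p)) =
          ps.filter (fun q => decide (q ∉ st ++ [p])) := by
        rw [List.filter_filter]
        apply List.filter_congr
        intro q _
        by_cases h1 : q ∈ st <;> by_cases h2 : q = p <;> simp [h1, h2]
      rw [hff]
      by_cases heq : (st.length : Int) + 1 = k
      · rw [if_pos (by simp only [PySem.Set.len, List.length_append, List.length_cons, List.length_nil]; push_cast; omega)]
        have h0 : (k - st.length - 1).toNat = 0 := by omega
        rw [h0]
        rfl
      · rw [if_neg (by simp only [PySem.Set.len, List.length_append, List.length_cons, List.length_nil]; push_cast; omega)]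
        rw [ih (st ++ [p]) k (by simp only [List.length_append, List.length_cons, List.length_nil]; push_cast; omega)]
        have hidx : (k - st.length - 1).toNat = (k - (st ++ [p]).length - 1).toNat + 1 := by
          simp only [List.length_append, List.length_cons, List.length_nil]
          push_cast
          omega
        rw [hidx]
        rfl

-- ===== VERDICT (by name: the statement is the Claim_ definition above) =====
theorem smallestPalindrome_spec : Claim_equal_smallestPalindrome := by
  unfold Claim_equal_smallestPalindrome
  intro s k _
  unfold Spec_smallestPalindrome
  simp only [smallestPalindrome, smallestPalindrome_alt]
  by_cases h1 : ((s.toList.length : Int) = 1 ∧ k = 1)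
  · rw [if_pos h1, if_pos h1]
  · rw [if_neg h1, if_neg h1]
    have hmt := pvStepAB (PySem.Int.floordiv (s.toList.length : Int) 2)
      (PySem.Dict.counter s.toList).items none 1 []
    rw [hmt.2, hmt.1]
    by_cases h2 : (((PySem.Dict.counter s.toList).items.foldl
        (pvStepB (PySem.Int.floordiv (s.toList.length : Int) 2)) (none, 1)).2 + 1 < k)
    · rw [if_pos h2, if_pos h2]
    · rw [if_neg h2, if_neg h2]
      rw [← pvCands_eq s.toList (PySem.Int.floordiv (s.toList.length : Int) 2)]
      set C := PySem.List.sorted ((PySem.Dict.counter s.toList).items.foldl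
        (pvStepA (PySem.Int.floordiv (s.toList.length : Int) 2)) (none, 1, [])).2.2 (fun x => x) with hC
      have hCp : C.Pairwise (· ≤ ·) := PySem.List.sorted_pairwise _ _
      have hdp := pvDedupF_perms C hCp
      by_cases hk1 : k < 1
      · rw [pvFindAns_nonpos _ _ _ (by omega), if_pos (Or.inl hk1)]
      · have h0k : (((PySem.Set.empty : PySem.Set (List Char)).length : Int)) < k := by
          simp only [PySem.Set.empty, List.length_nil]
          omega
        rw [pvFindAns_eq _ _ _ h0k]
        have hfe : (PySem.List.permutations C C.length).filter
            (fun p => decide (p ∉ (PySem.Set.empty : PySem.Set (List Char)))) =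
            PySem.List.permutations C C.length := by
          rw [List.filter_eq_self]
          intro x _
          simp [PySem.Set.empty]
        rw [hfe, hdp]
        have hidx : (k - ((PySem.Set.empty : PySem.Set (List Char)).length : Int) - 1).toNat
            = (k - 1).toNat := by
          simp only [PySem.Set.empty, List.length_nil]
          omega
        rw [hidx]
        by_cases h3 : ((pvDperms C).length : Int) < k
        · rw [List.getElem?_eq_none (by omega), if_pos (Or.inr h3)]
        · rw [if_neg (by push Not; exact ⟨by omega, by omega⟩)]
          have hlt : (k - 1).toNat < (pvDperms C).length := by omega
          have hget : PySem.List.pyGet? (pvDperms C) (k - 1) = (pvDperms C)[(k - 1).toNat]? := by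
            rw [show k - 1 = (((k - 1).toNat : Nat) : Int) from by omega, PySem.List.pyGet?_natCast]
            simp
          rw [hget, List.getElem?_eq_getElem hlt]
          rfl
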